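-- pv_equiv track=rewrite | github.com/sbrin/romance | assets/s1/update_choices.py | get_choices_values
-- ===== SOURCE A (Python) =====
-- def get_choices_values(n):
--     if n == 1:
--         return ["Да"]
--     elif n == 2:
--         return ["Да", "Нет"]
--     elif n == 3:
--         return ["Да", "Нет", "Не знаю"]
--     elif n == 4:
--         return ["Да", "Нет", "Не знаю", "Может быть"]
--     else:
--         # Fallback
--         base = ["Да", "Нет", "Не знаю", "Может быть"]
--         for i in range(5, n + 1):
--             base.append(f"Вариант {i}")
--         return base
-- ===== SOURCE B (Python) =====
-- LABELS = {1: "Да", 2: "Нет", 3: "Не знаю", 4: "Может быть"}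
--
--
-- def get_choices_values(n):
--     # Per-index label function: each position i gets its label independently,
--     # from a lookup table with a formatted fallback; no base list is sliced or grown.
--     count = n if n >= 1 else 4
--     return [LABELS.get(i, "Вариант %d" % i) for i in range(1, count + 1)]
-- ===== Notes on version B (the rewrite author's own statement) =====
-- stated objective: alternative
-- what changed: Instead of enumerating prefixes of a base list and appending extras in a loop, B computes each position's label independently: one map over the index range 1..count using a dict lookup with a formatted-string fallback (count = n, or 4 when n < 1).
import Mathlib
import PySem

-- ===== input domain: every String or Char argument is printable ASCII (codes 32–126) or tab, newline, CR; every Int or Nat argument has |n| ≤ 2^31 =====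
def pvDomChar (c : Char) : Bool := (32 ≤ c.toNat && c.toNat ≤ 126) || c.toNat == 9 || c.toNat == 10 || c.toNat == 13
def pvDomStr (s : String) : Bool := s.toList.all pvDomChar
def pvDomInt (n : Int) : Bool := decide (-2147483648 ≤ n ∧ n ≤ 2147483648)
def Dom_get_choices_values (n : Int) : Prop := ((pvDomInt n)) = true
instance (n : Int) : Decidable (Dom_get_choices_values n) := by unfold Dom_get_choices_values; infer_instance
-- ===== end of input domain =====

-- B computes each label independently from its index via a lookup table with a formatted
-- fallback, instead of enumerating prefixes and appending extras (objective: alternative).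

-- ===== PORT A =====
def get_choices_values (n : Int) : List String :=
  if n == 1 then ["Да"]
  else if n == 2 then ["Да", "Нет"]
  else if n == 3 then ["Да", "Нет", "Не знаю"]
  else if n == 4 then ["Да", "Нет", "Не знаю", "Может быть"]
  else
    (PySem.List.pyRange 5 (n + 1) 1).foldl
      (fun base i => base ++ ["Вариант " ++ PySem.Int.toStr i])
      ["Да", "Нет", "Не знаю", "Может быть"]

-- ===== PORT B =====
def pvLABELS : PySem.Dict Int String :=
  PySem.Dict.ofList [(1, "Да"), (2, "Нет"), (3, "Не знаю"), (4, "Может быть")]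

def get_choices_values_alt (n : Int) : List String :=
  let count := if n ≥ 1 then n else 4
  (PySem.List.pyRange 1 (count + 1) 1).map
    (fun i => pvLABELS.getD i ("Вариант " ++ PySem.Int.toStr i))

-- ===== PRECONDITION & SPEC =====
def Spec_get_choices_values (n : Int) (out : List String) : Prop := out = get_choices_values_alt n
instance (n : Int) (out : List String) : Decidable (Spec_get_choices_values n out) := by unfold Spec_get_choices_values; infer_instance

-- ===== CLAIM =====
def Claim_equal_get_choices_values : Prop := ∀ (n : Int), Dom_get_choices_values n → Spec_get_choices_values n (get_choices_values n)

-- ===== LEMMAS AND PROOFS =====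

-- A's accumulate-append loop is a map appended to the base
theorem pv_foldl_append_map (f : Int → String) (l : List Int) (base : List String) :
    l.foldl (fun b i => b ++ [f i]) base = base ++ l.map f := by
  induction l generalizing base with
  | nil => simp
  | cons x xs ih => simp [List.foldl, ih]

-- the lookup table misses every index ≥ 5, so B's map falls back to the formatted label there
theorem pv_labels_miss (i : Int) (h : 5 ≤ i) (d : String) : pvLABELS.getD i d = d := by
  show (((((PySem.Dict.empty : PySem.Dict Int String).insert 1 "Да").insert 2 "Нет").insert
      3 "Не знаю").insert 4 "Может быть").getD i d = d
  rw [PySem.Dict.getD_insert, if_neg (by omega), PySem.Dict.getD_insert, if_neg (by omega),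
    PySem.Dict.getD_insert, if_neg (by omega), PySem.Dict.getD_insert, if_neg (by omega),
    PySem.Dict.getD_empty]

-- ===== VERDICT =====
theorem get_choices_values_spec : Claim_equal_get_choices_values := by
  intro n _
  unfold Spec_get_choices_values get_choices_values get_choices_values_alt
  by_cases h1 : n = 1
  · subst h1; decide
  · by_cases h2 : n = 2
    · subst h2; decide
    · by_cases h3 : n = 3
      · subst h3; decide
      · by_cases h4 : n = 4
        · subst h4; decide
        · simp only [h1, h2, h3, h4, beq_iff_eq, if_false]
          rw [pv_foldl_append_map]
          by_cases hlo : n ≥ 1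
          · -- here n ≥ 5
            have h5 : 5 ≤ n := by omega
            simp only [hlo, if_pos]
            rw [PySem.List.pyRange_one_append 1 5 (n + 1) (by omega) (by omega),
              List.map_append]
            have hmiss : List.map (fun i => pvLABELS.getD i ("Вариант " ++ PySem.Int.toStr i))
                (PySem.List.pyRange 5 (n + 1) 1) =
                List.map (fun i => "Вариант " ++ PySem.Int.toStr i) (PySem.List.pyRange 5 (n + 1) 1) :=
              List.map_congr_left fun i hi =>
                pv_labels_miss i ((PySem.List.mem_pyRange_one).1 hi).1 _
            rw [hmiss]
            congr 1
          · -- n ≤ 0: the loop range is empty, B's count is 4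
            simp only [hlo, if_false]
            rw [PySem.List.pyRange_one_eq_nil (by omega : n + 1 ≤ 5)]
            decide
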